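-- pv_equiv track=rewrite | github.com/samjain98/python_practice | hw4.py | anagram_of_palindrome
-- ===== SOURCE A (Python) =====
-- def create_dict_from_string(word): #doing this frequently enough to create a method
--     wordDict = {}
--
--     for character in word:
--         wordDict[character] = word.count(character) #value in dictionary not important
--
--     return wordDict
--
-- def anagram_of_palindrome(word):
--
--     wordDict = create_dict_from_string(word)
--     singleOdd = 0; #only one odd character in odd lengthed words
--
--     if ( len(word) %2 == 0 ): #make sure all character counts are even in even word
--         for key in wordDict:
--             if (wordDict[key] %2 != 0):
--                 return False
--     else:
--         for key in wordDict: #only allow one odd character in odd word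
--             if (wordDict[key]%2 != 0 and singleOdd > 0):
--                 return False
--             elif (wordDict[key]%2 != 0):
--                 singleOdd += 1
--
--     return True
-- ===== SOURCE B (Python) =====
-- def anagram_of_palindrome(word):
--     odd = set()
--     for ch in word:
--         if ch in odd:
--             odd.discard(ch)
--         else:
--             odd.add(ch)
--     return len(odd) <= 1
-- ===== Notes on version B (the rewrite author's own statement) =====
-- stated objective: simpler
-- what changed: Replaces the count-dict built with repeated word.count plus two separate even/odd-length key loops by a single pass toggling a set of odd-parity characters and one final size test.
import Mathlib
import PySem

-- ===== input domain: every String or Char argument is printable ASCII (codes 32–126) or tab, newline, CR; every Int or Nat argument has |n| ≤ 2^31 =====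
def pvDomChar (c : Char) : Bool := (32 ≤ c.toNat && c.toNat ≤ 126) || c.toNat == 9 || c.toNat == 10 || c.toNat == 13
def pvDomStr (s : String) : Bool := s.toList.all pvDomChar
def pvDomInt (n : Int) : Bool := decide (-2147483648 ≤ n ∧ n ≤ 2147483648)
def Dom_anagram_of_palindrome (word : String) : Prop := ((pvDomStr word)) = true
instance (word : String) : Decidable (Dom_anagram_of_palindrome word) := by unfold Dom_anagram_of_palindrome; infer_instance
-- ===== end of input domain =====

-- B replaces A's count-dict and its two length-parity loops by one pass toggling a set of
-- odd-count characters and a final size test.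


-- ===== PORT A =====
-- create_dict_from_string: wordDict[character] = word.count(character)
def pvCreateDict (word : String) : PySem.Dict Char Int :=
  word.toList.foldl (fun d c => d.insert c ((word.toList.count c : Int))) PySem.Dict.empty

-- the even-length loop: 'for key in wordDict: if wordDict[key] % 2 != 0: return False'
def pvEvenLoop (d : PySem.Dict Char Int) : List Char → Bool
  | [] => true
  | k :: ks =>
    if PySem.Int.mod (d.getD k 0) 2 ≠ 0 then false
    else pvEvenLoop d ks

-- the odd-length loop with the singleOdd counter
def pvOddLoop (d : PySem.Dict Char Int) : List Char → Int → Bool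
  | [], _ => true
  | k :: ks, singleOdd =>
    if PySem.Int.mod (d.getD k 0) 2 ≠ 0 ∧ singleOdd > 0 then false
    else if PySem.Int.mod (d.getD k 0) 2 ≠ 0 then pvOddLoop d ks (singleOdd + 1)
    else pvOddLoop d ks singleOdd

def anagram_of_palindrome (word : String) : Bool :=
  let wordDict := pvCreateDict word
  if PySem.Int.mod (PySem.Str.len word) 2 = 0 then
    pvEvenLoop wordDict wordDict.keys
  else
    pvOddLoop wordDict wordDict.keys 0

-- ===== PORT B =====
-- one toggle step: discard ch if present, else add it
def pvToggle (s : PySem.Set Char) (c : Char) : PySem.Set Char :=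
  if PySem.Set.contains s c then PySem.Set.discard s c else PySem.Set.add s c

def anagram_of_palindrome_alt (word : String) : Bool :=
  decide (PySem.Set.len (word.toList.foldl pvToggle PySem.Set.empty) ≤ 1)

-- ===== PRECONDITION & SPEC =====
def Spec_anagram_of_palindrome (word : String) (out : Bool) : Prop := out = anagram_of_palindrome_alt word
instance (word : String) (out : Bool) : Decidable (Spec_anagram_of_palindrome word out) := by unfold Spec_anagram_of_palindrome; infer_instance

-- ===== CLAIM (what is proved, stated in full; the proofs are below) =====
def Claim_equal_anagram_of_palindrome : Prop := ∀ (word : String), Dom_anagram_of_palindrome word → Spec_anagram_of_palindrome word (anagram_of_palindrome word)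

-- ===== LEMMAS AND PROOFS =====

-- one toggle step keeps the set duplicate-free
lemma pvToggle_nodup (s : PySem.Set Char) (c : Char) (_hs : s.Nodup) : (pvToggle s c).Nodup := by
  unfold pvToggle
  split
  · exact PySem.Set.nodup_discard s c _hs
  · exact PySem.Set.nodup_add s c _hs

-- one toggle step flips membership exactly at the toggled character
lemma pvToggle_mem (s : PySem.Set Char) (c d : Char) (_hs : s.Nodup) :
    d ∈ pvToggle s c ↔ ¬ ((d ∈ s) ↔ d = c) := by
  unfold pvToggle
  split_ifs with h
  · rw [PySem.Set.contains_iff] at h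
    rw [PySem.Set.mem_discard]
    by_cases hd : d = c
    · subst hd; tauto
    · tauto
  · rw [PySem.Set.contains_iff] at h
    rw [PySem.Set.mem_add]
    by_cases hd : d = c
    · subst hd; tauto
    · tauto

-- one toggle step flips the parity of the set's size
lemma pvToggle_length (s : PySem.Set Char) (c : Char) (hs : s.Nodup) :
    (pvToggle s c).length % 2 = (s.length + 1) % 2 := by
  unfold pvToggle
  split_ifs with h
  · rw [PySem.Set.contains_iff] at h
    have he : s.erase c = PySem.Set.discard s c := by
      unfold PySem.Set.discard
      rw [List.Nodup.erase_eq_filter hs]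
      rfl
    have hlen : (s.erase c).length = s.length - 1 := List.length_erase_of_mem h
    have hpos : 1 ≤ s.length := List.length_pos_of_mem h
    rw [← he]
    omega
  · unfold PySem.Set.add
    rw [PySem.Set.contains_eq_listContains] at h ⊢
    simp only [h]
    simp

-- the whole toggle fold: Nodup, size parity, membership = odd count
lemma pvFold_spec (l : List Char) :
    ∀ (s : PySem.Set Char), s.Nodup →
      (l.foldl pvToggle s).Nodup ∧
      (l.foldl pvToggle s).length % 2 = (s.length + l.length) % 2 ∧
      (∀ c, c ∈ l.foldl pvToggle s ↔ ((c ∈ s) ↔ l.count c % 2 = 0)) := by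
  induction l with
  | nil =>
    intro s hs
    refine ⟨hs, by simp, ?_⟩
    intro c; simp
  | cons c0 t ih =>
    intro s hs
    have hnd := pvToggle_nodup s c0 hs
    obtain ⟨h1, h2, h3⟩ := ih (pvToggle s c0) hnd
    have hlt := pvToggle_length s c0 hs
    refine ⟨by simpa using h1, ?_, ?_⟩
    · simp only [List.foldl_cons]
      rw [h2]
      simp only [List.length_cons]
      omega
    · intro c
      simp only [List.foldl_cons]
      rw [h3 c, pvToggle_mem s c0 c hs, List.count_cons]
      by_cases hc : c = c0
      · subst hc
        have hB : (t.count c + 1) % 2 = 0 ↔ ¬ (t.count c % 2 = 0) := by omega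
        simp only [BEq.rfl, if_true, iff_true]
        tauto
      · have hb : (c0 == c) = false := by simp [Ne.symm hc]
        rw [hb, if_neg (by simp), Nat.add_zero, iff_false_intro hc]
        tauto

-- keys of A's dict are exactly the distinct characters of the word
lemma pvCreateDict_keys (word : String) :
    (pvCreateDict word).keys = PySem.Set.ofList word.toList := by
  unfold pvCreateDict
  rw [PySem.Dict.keys_foldl_insert word.toList (fun _ c => ((word.toList.count c : Int))) PySem.Dict.empty]
  rw [PySem.Dict.keys_empty, PySem.Set.update_nil_left]

lemma pvCreateDict_keys_nodup (word : String) : (pvCreateDict word).keys.Nodup := by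
  rw [pvCreateDict_keys]; exact PySem.Set.nodup_ofList _

-- the value stored under a key that occurs in the word is that character's count
lemma pvFoldInsert_getD (g : Char → Int) (l' : List Char) :
    ∀ (d : PySem.Dict Char Int) (k : Char),
      (l'.foldl (fun d c => d.insert c (g c)) d).getD k 0 =
        if k ∈ l' then g k else d.getD k 0 := by
  induction l' with
  | nil => intro d k; simp
  | cons c0 t ih =>
    intro d k
    simp only [List.foldl_cons]
    rw [ih]
    by_cases hk : k ∈ t
    · simp [hk]
    · by_cases hk0 : k = c0
      · simp [hk0]
      · simp [hk, hk0, PySem.Dict.getD_insert]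

lemma pvCreateDict_getD (word : String) (k : Char) (hk : k ∈ word.toList) :
    (pvCreateDict word).getD k 0 = (word.toList.count k : Int) := by
  unfold pvCreateDict
  rw [pvFoldInsert_getD (fun c => ((word.toList.count c : Int))) word.toList PySem.Dict.empty k]
  simp [hk]

-- oddness of the stored value, as a Nat-count statement
lemma pvOddVal_iff (word : String) (k : Char) (hk : k ∈ word.toList) :
    (PySem.Int.mod ((pvCreateDict word).getD k 0) 2 ≠ 0) ↔ word.toList.count k % 2 = 1 := by
  rw [pvCreateDict_getD word k hk]
  have h := PySem.Int.mod_natCast (word.toList.count k) 2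
  push_cast at h
  rw [h]
  omega

-- the even-length loop is an 'all keys have even count'
lemma pvEvenLoop_iff (d : PySem.Dict Char Int) (ks : List Char) :
    pvEvenLoop d ks = true ↔ ∀ k ∈ ks, PySem.Int.mod (d.getD k 0) 2 = 0 := by
  induction ks with
  | nil => simp [pvEvenLoop]
  | cons k t ih =>
    simp only [pvEvenLoop]
    split_ifs with h
    · simp only [false_iff]
      intro hall
      exact h (hall k (List.mem_cons_self))
    · have h' := not_not.mp h
      rw [ih]
      constructor
      · intro hall k' hk'
        rcases List.mem_cons.mp hk' with h1 | h1
        · exact h1 ▸ h'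
        · exact hall k' h1
      · intro hall k' hk'
        exact hall k' (List.mem_cons_of_mem _ hk')

-- the odd-length loop counts odd keys and fails past the first
lemma pvOddLoop_iff (d : PySem.Dict Char Int) (ks : List Char) :
    ∀ (n : Int), 0 ≤ n →
      (pvOddLoop d ks n = true ↔
        (ks.countP (fun k => decide (PySem.Int.mod (d.getD k 0) 2 ≠ 0)) : Int)
          + (if 0 < n then 1 else 0) ≤ 1) := by
  induction ks with
  | nil =>
    intro n hn
    constructor
    · intro _
      simp only [List.countP_nil]
      split_ifs <;> norm_num
    · intro _; rfl
  | cons k t ih =>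
    intro n hn
    simp only [pvOddLoop, List.countP_cons]
    by_cases hodd : PySem.Int.mod (d.getD k 0) 2 = 0
    · have hdec : (decide (PySem.Int.mod (d.getD k 0) 2 ≠ 0)) = false := by
        rw [hodd]; decide
      rw [if_neg (by tauto), if_neg (by tauto), ih n hn, hdec]
      simp
    · have hdec : (decide (PySem.Int.mod (d.getD k 0) 2 ≠ 0)) = true :=
        decide_eq_true hodd
      by_cases hpos : n > 0
      · rw [if_pos ⟨hodd, hpos⟩, hdec]
        simp only [Bool.false_eq_true, false_iff, if_true, not_le, if_pos hpos]
        push_cast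
        omega
      · rw [if_neg (by tauto), if_pos hodd, ih (n + 1) (by omega), hdec]
        rw [if_pos (show (0:Int) < n + 1 by omega), if_neg hpos]
        simp only [if_true]
        push_cast
        omega

-- the toggle set built from the empty set: members are exactly the odd-count characters
lemma pvFold_mem (word : String) (c : Char) :
    c ∈ word.toList.foldl pvToggle PySem.Set.empty ↔ word.toList.count c % 2 = 1 := by
  obtain ⟨-, -, h3⟩ := pvFold_spec word.toList PySem.Set.empty List.nodup_nil
  rw [h3 c]
  simp only [PySem.Set.empty, List.not_mem_nil, false_iff]
  omega

lemma pvFold_nodup (word : String) : (word.toList.foldl pvToggle PySem.Set.empty).Nodup :=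
  (pvFold_spec word.toList PySem.Set.empty List.nodup_nil).1

lemma pvFold_parity (word : String) :
    (word.toList.foldl pvToggle PySem.Set.empty).length % 2 = word.toList.length % 2 := by
  obtain ⟨-, h2, -⟩ := pvFold_spec word.toList PySem.Set.empty List.nodup_nil
  simpa using h2

-- the length-parity test of the port, in Nat form
lemma pvLen_mod (word : String) :
    PySem.Int.mod (PySem.Str.len word) 2 = 0 ↔ word.toList.length % 2 = 0 := by
  rw [PySem.Str.len_eq]
  have h := PySem.Int.mod_natCast word.toList.length 2
  push_cast at h
  rw [h]
  omega

-- ===== VERDICT (by name: the statement is the Claim_ definition above) =====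
theorem anagram_of_palindrome_spec : Claim_equal_anagram_of_palindrome := by
  intro word _
  unfold Spec_anagram_of_palindrome anagram_of_palindrome anagram_of_palindrome_alt
  set S := word.toList.foldl pvToggle PySem.Set.empty with hS
  have hkeys : ∀ c, c ∈ (pvCreateDict word).keys ↔ c ∈ word.toList := by
    intro c; rw [pvCreateDict_keys, PySem.Set.mem_ofList]
  rw [Bool.eq_iff_iff]
  split_ifs with hpar
  · -- even length: A demands every count even; B's set then has even size, so ≤ 1 means empty
    rw [pvLen_mod] at hpar
    rw [pvEvenLoop_iff]
    simp only [decide_eq_true_eq, PySem.Set.len]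
    constructor
    · intro hall
      have hnil : S = [] := by
        rw [List.eq_nil_iff_forall_not_mem]
        intro c hc
        have hodd := (pvFold_mem word c).mp hc
        have hmem : c ∈ word.toList := List.count_pos_iff.mp (by omega)
        have hk : c ∈ (pvCreateDict word).keys := (hkeys c).mpr hmem
        have := hall c hk
        exact ((pvOddVal_iff word c hmem).mpr hodd) this
      rw [hnil]; simp
    · intro hle
      have hlen : S.length = 0 := by
        have := pvFold_parity word
        rw [← hS] at this
        omega
      have hnil : S = [] := List.eq_nil_iff_length_eq_zero.mpr hlen
      intro k hk
      have hmem : k ∈ word.toList := (hkeys k).mp hk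
      by_contra hne
      have hodd := (pvOddVal_iff word k hmem).mp hne
      have : k ∈ S := (pvFold_mem word k).mpr hodd
      rw [hnil] at this
      exact List.not_mem_nil this
  · -- odd length: A allows one odd count; B's set size equals the number of odd keys
    rw [pvOddLoop_iff (pvCreateDict word) (pvCreateDict word).keys 0 le_rfl]
    simp only [decide_eq_true_eq, PySem.Set.len]
    have hcount : ((pvCreateDict word).keys.countP (fun k => decide (PySem.Int.mod ((pvCreateDict word).getD k 0) 2 ≠ 0))) = S.length := by
      rw [List.countP_eq_length_filter]
      have hperm : ((pvCreateDict word).keys.filter (fun k => decide (PySem.Int.mod ((pvCreateDict word).getD k 0) 2 ≠ 0))).Perm S := by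
        rw [List.perm_ext_iff_of_nodup (List.Nodup.filter _ (pvCreateDict_keys_nodup word)) (pvFold_nodup word)]
        intro c
        rw [List.mem_filter, pvFold_mem word c]
        constructor
        · rintro ⟨hk, hdec⟩
          have hmem : c ∈ word.toList := (hkeys c).mp hk
          exact (pvOddVal_iff word c hmem).mp (by simpa using hdec)
        · intro hodd
          have hmem : c ∈ word.toList := List.count_pos_iff.mp (by omega)
          refine ⟨(hkeys c).mpr hmem, ?_⟩
          · simpa using (pvOddVal_iff word c hmem).mpr hodd
      exact hperm.length_eq
    rw [hcount]
    simp
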